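-- pv_equiv track=rewrite | github.com/SriramPingali/CSE-IIT-Patna | Sem-8/CS563 - NLP/Mid-Sem Archive/Sriram_2022_Assn_Soln/Q2/Q2b.py | compute_known
-- ===== SOURCE A (Python) =====
-- RARE_WORD_MAX_FREQ = 5
--
-- def compute_known(penn_words):
--     known_words = set([])
--
--     no_of_words = {}
--
--     for item in penn_words:
--         for word in item:
--             if word in no_of_words:
--                 no_of_words[word] += 1
--             else:
--                 no_of_words[word] = 1
--
--     for item in no_of_words:
--         if no_of_words[item] > RARE_WORD_MAX_FREQ:
--             known_words.add(item)
--
--     return known_words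
-- ===== SOURCE B (Python) =====
-- RARE_WORD_MAX_FREQ = 5
--
-- def compute_known(penn_words):
--     # Worklist partition: repeatedly strip every occurrence of the current
--     # first word; its frequency is the length drop, no frequency dict at all.
--     words = [w for item in penn_words for w in item]
--     known_words = set()
--     while words:
--         w = words[0]
--         rest = [x for x in words[1:] if x != w]
--         if len(words) - len(rest) > RARE_WORD_MAX_FREQ:
--             known_words.add(w)
--         words = rest
--     return known_words
-- ===== Notes on version B (the rewrite author's own statement) =====
-- stated objective: alternative
-- what changed: B keeps no frequency dict: a worklist loop repeatedly takes the first remaining word, strips all its occurrences in one filter, derives its frequency from the length drop, and adds it to the result when that drop exceeds 5.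
import Mathlib
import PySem

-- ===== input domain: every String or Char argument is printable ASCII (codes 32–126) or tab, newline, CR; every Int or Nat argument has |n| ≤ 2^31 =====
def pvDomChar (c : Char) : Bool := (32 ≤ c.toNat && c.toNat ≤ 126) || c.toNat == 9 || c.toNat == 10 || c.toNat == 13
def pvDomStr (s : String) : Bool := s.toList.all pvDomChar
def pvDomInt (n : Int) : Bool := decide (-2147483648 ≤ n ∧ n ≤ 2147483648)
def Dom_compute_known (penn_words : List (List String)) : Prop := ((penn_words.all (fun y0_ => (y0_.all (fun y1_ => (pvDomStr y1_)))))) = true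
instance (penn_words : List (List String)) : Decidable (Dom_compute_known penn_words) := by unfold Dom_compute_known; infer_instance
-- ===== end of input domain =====

-- ===== PORT A =====
-- B replaces the count-then-filter dict scheme by a dict-free worklist partition; same
-- return value. A returns a Python set: the ports hold its distinct elements;
-- runtime comparison ignores order.
def compute_known (penn_words : List (List String)) : List String :=
  let no_of_words : PySem.Dict String Int :=
    penn_words.foldl (fun d item =>
      item.foldl (fun d word =>
        if d.contains word then d.insert word (d.getD word 0 + 1)
        else d.insert word 1) d) PySem.Dict.empty
  no_of_words.keys.foldl (fun s item =>
    if no_of_words.getD item 0 > 5 then PySem.Set.add s item else s) PySem.Set.empty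

-- ===== PORT B =====
-- the 'while words:' loop of Source B: structural recursion on the shrinking worklist
def goKnown (s : PySem.Set String) : List String → PySem.Set String
  | [] => s
  | w :: ws =>
    let rest := ws.filter (fun x => x != w)
    let known := if ((ws.length + 1 : Int) - (rest.length : Int) > 5)
                 then PySem.Set.add s w else s
    goKnown known rest
termination_by l => l.length
decreasing_by simpa using Nat.lt_succ_of_le (List.length_filter_le _ _)

def compute_known_alt (penn_words : List (List String)) : List String :=
  goKnown PySem.Set.empty (penn_words.flatMap (fun item => item))

-- ===== PRECONDITION & SPEC =====
def Spec_compute_known (penn_words : List (List String)) (out : List String) : Prop := out = compute_known_alt penn_words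
instance (penn_words : List (List String)) (out : List String) : Decidable (Spec_compute_known penn_words out) := by unfold Spec_compute_known; infer_instance

-- ===== CLAIM (what is proved, stated in full; the proofs are below) =====
def Claim_equal_compute_known : Prop := ∀ (penn_words : List (List String)), Dom_compute_known penn_words → Spec_compute_known penn_words (compute_known penn_words)

-- ===== LEMMAS AND PROOFS =====

-- A's membership-tested increment step is the plain counting step.
theorem countStep_eq (d : PySem.Dict String Int) (w : String) :
    (if d.contains w then d.insert w (d.getD w 0 + 1) else d.insert w 1)
      = d.insert w (d.getD w 0 + 1) := by
  by_cases h : d.contains w = true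
  · simp [h]
  · have h' : d.contains w = false := by simpa using h
    simp [h', PySem.Dict.getD_of_not_contains]

-- A's frequency dict is Counter(flatten penn_words).
theorem noOfWords_eq_counter (penn_words : List (List String)) :
    penn_words.foldl (fun d item =>
      item.foldl (fun d word =>
        if d.contains word then d.insert word (d.getD word 0 + 1)
        else d.insert word 1) d) PySem.Dict.empty
    = PySem.Dict.counter (penn_words.flatMap (fun item => item)) := by
  have hstep : (fun (d : PySem.Dict String Int) (word : String) =>
      if d.contains word then d.insert word (d.getD word 0 + 1)
      else d.insert word 1)
      = fun d word => d.insert word (d.getD word 0 + 1) := by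
    funext d w; exact countStep_eq d w
  rw [hstep, ← PySem.Dict.foldl_insert_getD_add_one_eq_counter,
      List.flatMap_def, List.foldl_flatten, List.foldl_map]

-- set(xs) commutes with filtering.
theorem ofList_filter (p : String → Bool) (l : List String) :
    PySem.Set.ofList (l.filter p) = (PySem.Set.ofList l).filter p := by
  induction l with
  | nil => rfl
  | cons x xs ih =>
    by_cases hx : p x = true
    · rw [List.filter_cons_of_pos hx, PySem.Set.ofList_cons, PySem.Set.ofList_cons, ih]
      simp only [PySem.Set.discard, List.filter_cons_of_pos hx, List.filter_filter]
      congr 1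
      apply List.filter_congr
      intro y _
      exact Bool.and_comm _ _
    · have hx' : p x = false := by simpa using hx
      rw [List.filter_cons_of_neg (by simp [hx']), PySem.Set.ofList_cons, ih]
      simp only [PySem.Set.discard, List.filter_cons_of_neg (by simp [hx'] : ¬ p x = true),
        List.filter_filter]
      apply List.filter_congr
      intro y _
      by_cases hy : y = x
      · subst hy; simp [hx']
      · simp [hy]

-- B's worklist loop computes A's filtered set.
theorem goKnown_eq (l : List String) (s : PySem.Set String) :
    goKnown s l
      = (PySem.Set.ofList l).foldl
          (fun s w => if ((l.count w : Int) > 5) then PySem.Set.add s w else s) s := by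
  induction hn : l.length using Nat.strong_induction_on generalizing l s with
  | _ n ih =>
    match l with
    | [] => simp [goKnown]
    | w :: ws =>
      rw [goKnown]
      have hrest : (ws.filter (fun x => x != w)).length < n := by
        subst hn
        simpa using Nat.lt_succ_of_le (List.length_filter_le _ _)
      have hcnt : ((ws.length + 1 : Int) - ((ws.filter (fun x => x != w)).length : Int))
          = ((w :: ws).count w : Int) := by
        have h0 := List.length_eq_countP_add_countP (p := fun x => x == w) (l := ws)
        have hfun : (fun a : String => decide ¬(a == w) = true) = (fun x : String => !(x == w)) := by
          funext a
          by_cases h : a == w <;> simp [h]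
        rw [hfun] at h0
        have h1 : (ws.filter (fun x => x != w)).length = List.countP (fun x => !(x == w)) ws := by
          rw [← List.countP_eq_length_filter]
          simp only [bne]
        have h2 : ws.count w = List.countP (fun x => x == w) ws := rfl
        rw [List.count_cons_self, h1]
        push_cast
        omega
      have hdis : (PySem.Set.ofList ws).discard w
          = PySem.Set.ofList (ws.filter (fun x => x != w)) := by
        rw [ofList_filter]
        rfl
      rw [ih _ hrest _ _ rfl]
      rw [PySem.Set.ofList_cons, List.foldl_cons, hdis, hcnt]
      apply PySem.List.foldl_congr_mem
      intro acc x hx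
      have hxmem : x ∈ ws.filter (fun y => y != w) := by
        simpa [PySem.Set.mem_ofList] using hx
      have hxw : x ≠ w := by
        have := (List.mem_filter.mp hxmem).2
        simpa using this
      have hcc : (w :: ws).count x = ws.count x := by
        simp [Ne.symm hxw]
      rw [List.count_filter (by simpa using hxw), hcc]

-- ===== VERDICT (by name: the statement is the Claim_ definition above) =====
theorem compute_known_spec : Claim_equal_compute_known := by
  intro penn_words _
  show compute_known penn_words = compute_known_alt penn_words
  unfold compute_known compute_known_alt
  rw [goKnown_eq]
  simp only [noOfWords_eq_counter, PySem.Dict.keys_counter, PySem.Dict.getD_counter]
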